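-- pv_equiv track=rewrite | github.com/dosdos/Google-CodeJam | 2008/practice_problems/A_alien_numbers/alien_numbers.py | alien_to_int
-- ===== SOURCE A (Python) =====
-- def alien_to_int(n, language):
--
--     n = str(n)
--     base = len(language)
--
--     if n == 0:
--         return language[0]
--
--     s = 0
--     i = 0
--     for cipher in n[::-1]:
--         s += (base ** i ) * language.index(cipher)
--         i += 1
--
--     return s
-- ===== SOURCE B (Python) =====
-- def alien_to_int(n, language):
--     n = str(n)
--     base = len(language)
--
--     if n == 0:
--         return language[0]
--
--     s = 0
--     for cipher in n:
--         s = s * base + language.index(cipher)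
--     return s
-- ===== Notes on version B (the rewrite author's own statement) =====
-- stated objective: faster
-- what changed: Replaces the reversed-digit sum of independent power terms (base**i recomputed as a bignum power each step alongside a counter) with a single left-to-right Horner accumulator s = s*base + digit, eliminating the reversal and all exponentiation.
import Mathlib
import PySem

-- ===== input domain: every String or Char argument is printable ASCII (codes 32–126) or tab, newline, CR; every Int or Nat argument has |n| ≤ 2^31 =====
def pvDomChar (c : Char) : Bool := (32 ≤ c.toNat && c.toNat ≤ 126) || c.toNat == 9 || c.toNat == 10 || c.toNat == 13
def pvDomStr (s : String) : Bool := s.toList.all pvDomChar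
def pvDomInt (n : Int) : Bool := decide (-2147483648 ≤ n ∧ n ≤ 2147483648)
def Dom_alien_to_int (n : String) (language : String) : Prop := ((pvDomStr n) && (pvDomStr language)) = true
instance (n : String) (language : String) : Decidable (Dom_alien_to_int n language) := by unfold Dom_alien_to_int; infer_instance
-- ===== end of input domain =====

-- B replaces A's reversed loop of independent base**i power terms with a left-to-right
-- Horner accumulator (s = s*base + digit); same values, no reversal and no exponentiation.


-- digit value: language.index(cipher); Python raises ValueError when cipher ∉ language,
-- excluded by Pre_ below (the .getD 0 is never reached inside Pre_)
def pvIdx (language : String) (c : Char) : Int :=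
  ((PySem.List.index? language.toList c).getD 0 : Nat)

-- ===== PORT A =====
-- `n = str(n)` is the identity on a string argument; `if n == 0:` compares a str with
-- the int 0 and is always False in Python, so the guard is dead and carried as this comment.
def alien_to_int (n : String) (language : String) : Int :=
  let base : Int := (language.length : Int)
  (((n.toList.reverse).foldl
      (fun (st : Int × Nat) cipher => (st.1 + base ^ st.2 * pvIdx language cipher, st.2 + 1))
      ((0 : Int), (0 : Nat)))).1

-- ===== PORT B =====
-- same identity `str(n)` and same dead guard; Horner accumulator over n left-to-right
def alien_to_int_alt (n : String) (language : String) : Int :=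
  let base : Int := (language.length : Int)
  n.toList.foldl (fun s cipher => s * base + pvIdx language cipher) 0

-- ===== PRECONDITION & SPEC =====
-- Pre_ excludes exactly the inputs where Python's language.index(cipher) raises ValueError:
-- every character of n must occur in language.
def Pre_alien_to_int (n : String) (language : String) : Prop :=
  (n.toList.all (fun c => language.toList.contains c)) = true
instance (n : String) (language : String) : Decidable (Pre_alien_to_int n language) := by
  unfold Pre_alien_to_int; infer_instance

def pvWitness_alien_to_int : String × String := ("ba", "ab")

def Spec_alien_to_int (n : String) (language : String) (out : Int) : Prop := out = alien_to_int_alt n language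
instance (n : String) (language : String) (out : Int) : Decidable (Spec_alien_to_int n language out) := by unfold Spec_alien_to_int; infer_instance

-- ===== CLAIM (what is proved, stated in full; the proofs are below) =====
def Claim_equal_alien_to_int : Prop := ∀ (n : String) (language : String), Dom_alien_to_int n language → Pre_alien_to_int n language → Spec_alien_to_int n language (alien_to_int n language)

-- ===== LEMMAS AND PROOFS =====

-- shifting the Horner accumulator out of the fold
theorem horner_shift (base : Int) (d : Char → Int) :
    ∀ (l : List Char) (s : Int),
      l.foldl (fun s c => s * base + d c) s
        = s * base ^ l.length + l.foldl (fun s c => s * base + d c) 0 := by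
  intro l
  induction l with
  | nil => intro s; simp
  | cons c cs ih =>
    intro s
    simp only [List.foldl_cons, List.length_cons]
    rw [ih (s * base + d c), ih (0 * base + d c)]
    ring

-- A's loop over the reversed digits computes B's Horner value
theorem loop_eq (base : Int) (d : Char → Int) :
    ∀ (l : List Char) (s : Int) (i : Nat),
      (l.reverse.foldl
        (fun (st : Int × Nat) c => (st.1 + base ^ st.2 * d c, st.2 + 1)) (s, i))
        = (s + base ^ i * l.foldl (fun s c => s * base + d c) 0, i + l.length) := by
  intro l
  induction l with
  | nil => intro s i; simp
  | cons c cs ih =>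
    intro s i
    simp only [List.reverse_cons, List.foldl_append, List.foldl_cons, List.foldl_nil,
      List.length_cons, ih]
    rw [horner_shift base d cs (0 * base + d c)]
    rw [Prod.mk.injEq]
    refine ⟨by rw [pow_add]; ring, by omega⟩

-- ===== VERDICT (by name: the statement is the Claim_ definition above) =====
theorem alien_to_int_spec : Claim_equal_alien_to_int := by
  intro n language _ _
  unfold Spec_alien_to_int alien_to_int alien_to_int_alt
  dsimp only
  rw [loop_eq ((language.length : Int)) (pvIdx language) n.toList 0 0]
  simp
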